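-- pv_equiv track=rewrite | github.com/antmachineintelligence/Feedback_1st | utils/utils.py | get_sentence_split
-- ===== SOURCE A (Python) =====
-- sentence_split = [';', ',', '.', '?', '!', '"']
--
-- null_symbol = ['\xa0', '\n', '\x93', ' ']
--
-- def get_sentence_split(text,pred_head=[]):
--     start = []
--     end = True
--     for i,t in enumerate(text):
--         if t == ' ':
--             continue
--         if i in pred_head:
--             start.append(i)
--             end = False
--         if (t in sentence_split and text[i-1] not in null_symbol) or \
--             (t in null_symbol):
--             end = True
--             if (t in null_symbol) and (text[i-1] not in null_symbol):
--                 start.append(i)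
--         elif end == True:
--             start.append(i)
--             end = False
--         else:
--             pass
--     result = []
--     for start,end in zip(start,start[1:]+[len(text)]):
-- #         lenght = len(text[start:end].strip())
--         result.append([start,end])
--     return result
-- ===== SOURCE B (Python) =====
-- sentence_split = [';', ',', '.', '?', '!', '"']
--
-- null_symbol = ['\xa0', '\n', '\x93', ' ']
--
-- def get_sentence_split(text, pred_head=[]):
--     # Staged, stateless formulation: instead of simulating A's mutable `end` flag,
--     # precompute for each index the previous non-space index, decide each start
--     # event with a pure per-index predicate, then pair consecutive starts.
--     # Correctness: A's `end` flag before a non-space index i is True exactly when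
--     # there is no earlier non-space index or the last one is a boundary character
--     # (boundaries set it True; every other processed character leaves it False).
--     n = len(text)
--
--     def is_boundary(i):
--         t = text[i]
--         return (t in sentence_split and text[i - 1] not in null_symbol) \
--             or t in null_symbol
--
--     # stage 1: for each index, the index of the last non-space character before it
--     prev_ns = []
--     last = None
--     for i, t in enumerate(text):
--         prev_ns.append(last)
--         if t != ' ':
--             last = i
--
--     # stage 2: the start events at index i, decided without any running state
--     def events(i, t, p):
--         if t == ' ':
--             return []
--         ev = [i] if i in pred_head else []
--         if is_boundary(i):
--             if t in null_symbol and text[i - 1] not in null_symbol: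
--                 ev.append(i)
--         elif i not in pred_head and (p is None or is_boundary(p)):
--             ev.append(i)
--         return ev
--
--     starts = [j for (i, t), p in zip(enumerate(text), prev_ns) for j in events(i, t, p)]
--     # stage 3: pair consecutive starts, closing the last range at len(text)
--     return [[s, e] for s, e in zip(starts, starts[1:] + [n])]
-- ===== Notes on version B (the rewrite author's own statement) =====
-- stated objective: alternative
-- what changed: Replaces A's single stateful scan with a mutable end-flag by a staged stateless formulation: a first pass records each index's previous non-space index, a pure per-index predicate (is_boundary on that neighbour) then decides the start events, and consecutive starts are zipped into ranges.
import Mathlib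
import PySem

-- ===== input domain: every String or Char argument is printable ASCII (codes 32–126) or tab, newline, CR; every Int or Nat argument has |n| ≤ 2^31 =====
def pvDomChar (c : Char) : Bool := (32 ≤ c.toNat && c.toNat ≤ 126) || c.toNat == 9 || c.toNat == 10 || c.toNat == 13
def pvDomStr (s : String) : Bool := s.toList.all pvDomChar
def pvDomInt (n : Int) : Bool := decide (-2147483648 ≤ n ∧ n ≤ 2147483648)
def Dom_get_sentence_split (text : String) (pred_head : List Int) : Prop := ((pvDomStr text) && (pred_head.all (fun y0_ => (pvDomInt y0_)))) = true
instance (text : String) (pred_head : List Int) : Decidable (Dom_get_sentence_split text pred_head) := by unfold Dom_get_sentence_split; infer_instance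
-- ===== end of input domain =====

-- B replaces A's single stateful scan (a mutable `end` flag threaded through the
-- loop) by a staged, stateless formulation: a first pass records each index's
-- previous non-space index, a pure per-index predicate then yields the start
-- events, and consecutive starts are paired.  Objective: alternative.

-- ===== PORT A =====
def gssSent : List Char := [';', ',', '.', '?', '!', '"']
def gssNull : List Char := ['\xa0', '\n', '\x93', ' ']

-- one iteration of A's for-loop; state = (start list, end flag); text[i-1]
-- (Python wraparound) is PySem.List.pyGetD cs (i-1) ' ': the default is never
-- reached while the loop runs (the text is nonempty then, -1 wraps to the end)
def gssStepA (cs : List Char) (pred_head : List Int) (st : List Int × Bool)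
    (it : Int × Char) : List Int × Bool :=
  let start := st.1
  let e := st.2
  let i := it.1
  let t := it.2
  if t = ' ' then (start, e)
  else
    let start := if i ∈ pred_head then start ++ [i] else start
    let e := if i ∈ pred_head then false else e
    let pc := PySem.List.pyGetD cs (i - 1) ' '
    if (t ∈ gssSent ∧ pc ∉ gssNull) ∨ t ∈ gssNull then
      if t ∈ gssNull ∧ pc ∉ gssNull then (start ++ [i], true) else (start, true)
    else if e then (start ++ [i], false)
    else (start, e)

def get_sentence_split (text : String) (pred_head : List Int) : List (List Int) :=
  let cs := text.toList
  let start := ((PySem.List.enumerate cs).foldl (gssStepA cs pred_head) ([], true)).1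
  (start.zip (start.drop 1 ++ [(cs.length : Int)])).foldl
    (fun r p => r ++ [[p.1, p.2]]) []

-- ===== PORT B =====
-- B's pure `is_boundary(i)` predicate (reads text[i] and text[i-1])
def gssBoundary (cs : List Char) (i : Int) : Bool :=
  let t := PySem.List.pyGetD cs i ' '
  decide ((t ∈ gssSent ∧ PySem.List.pyGetD cs (i - 1) ' ' ∉ gssNull) ∨ t ∈ gssNull)

-- B's pure `events(i, t, p)`: the start events at index i (t = text[i], p = prev_ns[i])
def gssEvents (cs : List Char) (pred_head : List Int) (i : Int) (t : Char)
    (p : Option Int) : List Int :=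
  if t = ' ' then []
  else
    let ev := if i ∈ pred_head then [i] else []
    if gssBoundary cs i then
      if t ∈ gssNull ∧ PySem.List.pyGetD cs (i - 1) ' ' ∉ gssNull then ev ++ [i] else ev
    else if i ∉ pred_head ∧ (match p with | none => true | some j => gssBoundary cs j) = true then
      ev ++ [i]
    else ev

-- B's stage-1 loop: state = (prev_ns list, last non-space index so far)
def gssStepPrev (st : List (Option Int) × Option Int) (it : Int × Char) :
    List (Option Int) × Option Int :=
  (st.1 ++ [st.2], if it.2 ≠ ' ' then some it.1 else st.2)

def get_sentence_split_alt (text : String) (pred_head : List Int) : List (List Int) :=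
  let cs := text.toList
  let prev_ns := ((PySem.List.enumerate cs).foldl gssStepPrev ([], none)).1
  let starts := ((PySem.List.enumerate cs).zip prev_ns).flatMap
    (fun x => gssEvents cs pred_head x.1.1 x.1.2 x.2)
  (starts.zip (starts.drop 1 ++ [(cs.length : Int)])).map (fun p => [p.1, p.2])

-- ===== PRECONDITION & SPEC =====
def Spec_get_sentence_split (text : String) (pred_head : List Int) (out : List (List Int)) : Prop := out = get_sentence_split_alt text pred_head
instance (text : String) (pred_head : List Int) (out : List (List Int)) : Decidable (Spec_get_sentence_split text pred_head out) := by unfold Spec_get_sentence_split; infer_instance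

-- ===== CLAIM (what is proved, stated in full; the proofs are below) =====
def Claim_equal_get_sentence_split : Prop := ∀ (text : String) (pred_head : List Int), Dom_get_sentence_split text pred_head → Spec_get_sentence_split text pred_head (get_sentence_split text pred_head)

-- ===== LEMMAS AND PROOFS =====

-- recursive view of B's stage-1 list (the `prev_ns` values, in order)
def gssAnn (L : Option Int) : List (Int × Char) → List (Option Int)
  | [] => []
  | (i, t) :: l => L :: gssAnn (if t ≠ ' ' then some i else L) l

theorem gssStepPrev_fold (l : List (Int × Char)) (acc : List (Option Int)) (L : Option Int) :
    (l.foldl gssStepPrev (acc, L)).1 = acc ++ gssAnn L l := by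
  induction l generalizing acc L with
  | nil => simp [gssAnn]
  | cons x l ih => cases x with | mk i t => simp [gssStepPrev, gssAnn, ih]

-- A's `end` flag, as a function of the last non-space index seen so far
def gssEnd (cs : List Char) : Option Int → Bool
  | none => true
  | some j => gssBoundary cs j

-- one step: A's transition from the flag view produces exactly B's events
theorem gssStep_events (cs : List Char) (ph : List Int) (S : List Int) (L : Option Int)
    (i : Int) (t : Char) (ht : PySem.List.pyGetD cs i ' ' = t) :
    gssStepA cs ph (S, gssEnd cs L) (i, t) =
      (S ++ gssEvents cs ph i t L, gssEnd cs (if t = ' ' then L else some i)) := by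
  unfold gssStepA gssEvents
  dsimp only
  by_cases hsp : t = ' '
  · simp [hsp]
  · have hb : gssBoundary cs i =
        decide ((t ∈ gssSent ∧ PySem.List.pyGetD cs (i - 1) ' ' ∉ gssNull) ∨ t ∈ gssNull) := by
      simp [gssBoundary, ht]
    cases L <;>
      simp only [gssEnd, if_neg hsp, hb] <;>
      split_ifs <;> simp_all

-- the fold of A over any enumerate-suffix, seen through the flag view,
-- accumulates exactly B's zipped flatMap of events
theorem gssFold_events (cs : List Char) (ph : List Int) (l : List (Int × Char))
    (S : List Int) (L : Option Int)
    (h : ∀ p ∈ l, PySem.List.pyGetD cs p.1 ' ' = p.2) :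
    l.foldl (gssStepA cs ph) (S, gssEnd cs L) =
      (S ++ (l.zip (gssAnn L l)).flatMap (fun x => gssEvents cs ph x.1.1 x.1.2 x.2),
       gssEnd cs (l.foldl (fun L p => if p.2 = ' ' then L else some p.1) L)) := by
  induction l generalizing S L with
  | nil => simp
  | cons x l ih =>
    cases x with
    | mk i t =>
      have ht : PySem.List.pyGetD cs i ' ' = t := h (i, t) (by simp)
      simp only [List.foldl_cons, gssStep_events cs ph S L i t ht, gssAnn, List.zip_cons_cons,
        List.flatMap_cons]
      rw [ih _ _ (fun p hp => h p (by simp [hp]))]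
      by_cases hsp : t = ' ' <;> simp [hsp]

-- A's second loop (foldl-append) is a map over the zipped list
theorem gssFoldAppend (l : List (Int × Int)) (acc : List (List Int)) :
    l.foldl (fun r p => r ++ [[p.1, p.2]]) acc = acc ++ l.map (fun p => [p.1, p.2]) := by
  induction l generalizing acc with
  | nil => simp
  | cons x l ih => simp [ih]

-- every enumerate pair of cs is a genuine (index, character) lookup
theorem gssEnum_lookup (cs : List Char) (p : Int × Char)
    (hp : p ∈ PySem.List.enumerate cs) : PySem.List.pyGetD cs p.1 ' ' = p.2 := by
  rw [PySem.List.mem_enumerate_iff] at hp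
  obtain ⟨k, hk, rfl⟩ := hp
  simp [PySem.List.pyGetD_natCast, List.getD, hk]

-- ===== VERDICT (by name: the statement is the Claim_ definition above) =====
theorem get_sentence_split_spec : Claim_equal_get_sentence_split := by
  intro text pred_head _
  show get_sentence_split text pred_head = get_sentence_split_alt text pred_head
  unfold get_sentence_split get_sentence_split_alt
  dsimp only
  rw [gssStepPrev_fold, List.nil_append, gssFoldAppend]
  have h := gssFold_events text.toList pred_head (PySem.List.enumerate text.toList) [] none
    (fun p hp => gssEnum_lookup text.toList p hp)
  simp only [gssEnd] at h
  rw [h]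
  simp
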